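-- pv_equiv track=rewrite | github.com/Ottovon-Bis89/Functional_software_for-Genome_Evolution | Supplementary_Code/Evolver.py | apply_deletion
-- ===== SOURCE A (Python) =====
-- def apply_deletion(genome, position):
--     """Delete an element at a specific position in the genome."""
--     # Find the target chromosome and position
--     total_length = 0
--     for chrom_idx, chromosome in enumerate(genome):
--         if total_length + len(chromosome) > position:
--             pos_in_chrom = position - total_length
--             if len(chromosome) > 1:  # Ensure we don't create empty chromosomes
--                 del chromosome[pos_in_chrom]
--             break
--         total_length += len(chromosome)
--     return genome
-- ===== SOURCE B (Python) =====
-- def apply_deletion(genome, position):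
--     """Delete an element at a specific position in the genome."""
--     # Prefix sums of chromosome lengths, then binary search for the target
--     # chromosome instead of a linear accumulation scan.
--     prefix = []
--     total = 0
--     for chrom in genome:
--         total += len(chrom)
--         prefix.append(total)
--     # leftmost index with prefix[idx] > position (== bisect_right(prefix, position))
--     lo, hi = 0, len(genome)
--     while lo < hi:
--         mid = (lo + hi) // 2
--         if prefix[mid] > position:
--             hi = mid
--         else:
--             lo = mid + 1
--     if lo < len(genome):
--         chrom = genome[lo]
--         if len(chrom) > 1:
--             del chrom[position - (prefix[lo] - len(chrom))]
--     return genome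
-- ===== Notes on version B (the rewrite author's own statement) =====
-- stated objective: alternative
-- what changed: Replaces the linear accumulate-and-break scan with a prefix-sum array of chromosome lengths plus a hand-written binary search (bisect_right) that locates the target chromosome; the deletion index is recomputed from the prefix sums.
import Mathlib
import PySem

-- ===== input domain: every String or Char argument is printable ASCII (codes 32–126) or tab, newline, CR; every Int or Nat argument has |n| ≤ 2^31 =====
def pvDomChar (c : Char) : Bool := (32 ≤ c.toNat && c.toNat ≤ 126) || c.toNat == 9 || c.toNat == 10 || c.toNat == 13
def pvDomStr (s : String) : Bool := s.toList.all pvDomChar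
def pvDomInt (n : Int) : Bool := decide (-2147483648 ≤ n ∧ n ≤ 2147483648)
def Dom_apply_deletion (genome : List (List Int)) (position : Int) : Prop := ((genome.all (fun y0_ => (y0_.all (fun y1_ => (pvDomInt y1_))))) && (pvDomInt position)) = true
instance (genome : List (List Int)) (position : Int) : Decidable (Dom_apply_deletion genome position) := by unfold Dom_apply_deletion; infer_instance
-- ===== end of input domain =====

-- B replaces A's linear accumulate-and-break scan with a prefix-sum array and a binary
-- search for the target chromosome (alternative decomposition, same overall cost).
-- Both Pythons mutate the target chromosome in place identically; the theorem is about
-- the returned genome.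


-- ===== PORT A =====
-- 'del xs[i]' (Python list deletion, negative i from the end); out-of-range (IndexError)
-- is excluded by Pre_, there the helper is a no-op.
def pyDel (xs : List Int) (i : Int) : List Int :=
  ((PySem.List.pop? xs i).map Prod.snd).getD xs

-- the for-loop with its running total and 'break'
def applyDelLoop (position total : Int) : List (List Int) → List (List Int)
  | [] => []
  | c :: rest =>
    if total + (c.length : Int) > position then
      (if 1 < c.length then pyDel c (position - total) else c) :: rest
    else c :: applyDelLoop position (total + (c.length : Int)) rest

def apply_deletion (genome : List (List Int)) (position : Int) : List (List Int) :=
  applyDelLoop position 0 genome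

-- ===== PORT B =====
-- the while-loop: leftmost index lo in [lo,hi) with prefix[lo] > position, else hi
def bsearchLoop (pref : List Int) (position : Int) (lo hi : Nat) : Nat :=
  if lo < hi then
    let mid := (lo + hi) / 2
    if position < (PySem.List.pyGet? pref (mid : Int)).getD 0 then
      bsearchLoop pref position lo mid
    else
      bsearchLoop pref position (mid + 1) hi
  else lo
termination_by hi - lo
decreasing_by all_goals omega

def apply_deletion_alt (genome : List (List Int)) (position : Int) : List (List Int) :=
  -- prefix sums of chromosome lengths
  let st := genome.foldl
    (fun (st : List Int × Int) chrom =>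
      (st.1 ++ [st.2 + (chrom.length : Int)], st.2 + (chrom.length : Int))) ([], 0)
  let pref := st.1
  let lo := bsearchLoop pref position 0 genome.length
  if lo < genome.length then
    let c := (PySem.List.pyGet? genome (lo : Int)).getD []
    if 1 < c.length then
      genome.set lo (pyDel c (position - ((PySem.List.pyGet? pref (lo : Int)).getD 0 - (c.length : Int))))
    else genome
  else genome

-- ===== PRECONDITION & SPEC =====
-- Pre_ excludes exactly the inputs where the Python A raises IndexError: a negative
-- position reaching past the left end of the first chromosome (when that chromosome
-- has more than one element, so the delete is attempted).
def Pre_apply_deletion (genome : List (List Int)) (position : Int) : Prop :=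
  genome.head?.all (fun g0 => decide (g0.length ≤ 1) || decide (-(g0.length : Int) ≤ position)) = true
instance (genome : List (List Int)) (position : Int) : Decidable (Pre_apply_deletion genome position) := by unfold Pre_apply_deletion; infer_instance

def pvWitness_apply_deletion : List (List Int) × Int := ([[1, 2], [3]], 1)

def Spec_apply_deletion (genome : List (List Int)) (position : Int) (out : List (List Int)) : Prop := out = apply_deletion_alt genome position
instance (genome : List (List Int)) (position : Int) (out : List (List Int)) : Decidable (Spec_apply_deletion genome position out) := by unfold Spec_apply_deletion; infer_instance

-- ===== CLAIM (what is proved, stated in full; the proofs are below) =====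
def Claim_equal_apply_deletion : Prop := ∀ (genome : List (List Int)) (position : Int), Dom_apply_deletion genome position → Pre_apply_deletion genome position → Spec_apply_deletion genome position (apply_deletion genome position)

-- ===== LEMMAS AND PROOFS =====

-- cumulative length sum of the first k chromosomes
def cumLen (genome : List (List Int)) (k : Nat) : Int :=
  (((genome.take k).map (fun c => (c.length : Int)))).sum

-- the prefix list as a pure recursion
def cumList (t : Int) : List (List Int) → List Int
  | [] => []
  | c :: rest => (t + (c.length : Int)) :: cumList (t + (c.length : Int)) rest

lemma foldl_pref (genome : List (List Int)) (acc : List Int) (t : Int) :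
    (genome.foldl
      (fun (st : List Int × Int) chrom =>
        (st.1 ++ [st.2 + (chrom.length : Int)], st.2 + (chrom.length : Int))) (acc, t)).1
      = acc ++ cumList t genome := by
  induction genome generalizing acc t with
  | nil => simp [cumList]
  | cons c rest ih => simp [List.foldl, cumList, ih]

lemma cumList_length (t : Int) (genome : List (List Int)) :
    (cumList t genome).length = genome.length := by
  induction genome generalizing t with
  | nil => rfl
  | cons c rest ih => simp [cumList, ih]

lemma cumList_get (genome : List (List Int)) (t : Int) (i : Nat) (hi : i < genome.length) :
    (PySem.List.pyGet? (cumList t genome) (i : Int)).getD 0 = t + cumLen genome (i + 1) := by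
  induction genome generalizing t i with
  | nil => simp at hi
  | cons c rest ih =>
    cases i with
    | zero => simp [cumList, cumLen, PySem.List.pyGet?_natCast]
    | succ n =>
      have hn : n < rest.length := by simpa using hi
      have := ih (t + (c.length : Int)) n hn
      simp only [cumList, PySem.List.pyGet?_natCast] at this ⊢
      simp only [List.getElem?_cons_succ]
      rw [this]
      simp [cumLen, List.take_succ_cons]
      ring

lemma cumLen_mono (genome : List (List Int)) {i j : Nat} (h : i ≤ j) :
    cumLen genome i ≤ cumLen genome j := by
  unfold cumLen
  have : genome.take j = genome.take i ++ (genome.take j).drop i := by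
    rw [List.drop_take]
    rw [← List.take_append_drop i (genome.take j), List.take_take]
    simp [Nat.min_eq_left h, List.drop_take]
  rw [this]
  simp only [List.map_append, List.sum_append, le_add_iff_nonneg_right]
  apply List.sum_nonneg
  intro x hx
  simp only [List.mem_map] at hx
  obtain ⟨c, _, rfl⟩ := hx
  positivity

lemma cumLen_succ (genome : List (List Int)) (k : Nat) (hk : k < genome.length) :
    cumLen genome (k + 1) = cumLen genome k + (genome[k].length : Int) := by
  unfold cumLen
  rw [List.map_take, List.map_take, List.sum_take_succ _ k (by simpa using hk)]
  simp

-- binary-search correctness over the prefix list (needs only its monotonicity)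
lemma bsearch_spec (p : List Int) (pos : Int)
    (mono : ∀ i j : Nat, i ≤ j → j < p.length → (PySem.List.pyGet? p (i : Int)).getD 0 ≤ (PySem.List.pyGet? p (j : Int)).getD 0) :
    ∀ (fuel lo hi : Nat), hi - lo ≤ fuel → lo ≤ hi → hi ≤ p.length →
    (∀ i : Nat, i < lo → (PySem.List.pyGet? p (i : Int)).getD 0 ≤ pos) →
    (∀ i : Nat, hi ≤ i → i < p.length → pos < (PySem.List.pyGet? p (i : Int)).getD 0) →
    let r := bsearchLoop p pos lo hi
    r ≤ p.length ∧ (∀ i : Nat, i < r → (PySem.List.pyGet? p (i : Int)).getD 0 ≤ pos) ∧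
      (r < p.length → pos < (PySem.List.pyGet? p (r : Int)).getD 0) := by
  intro fuel
  induction fuel with
  | zero =>
    intro lo hi hf hlh hhp hlow hhigh
    have : lo = hi := by omega
    subst this
    rw [bsearchLoop]
    simp only [lt_irrefl, if_false]
    exact ⟨hhp, hlow, fun h => hhigh lo le_rfl h⟩
  | succ n ihf =>
    intro lo hi hf hlh hhp hlow hhigh
    rw [bsearchLoop]
    by_cases hlt : lo < hi
    · simp only [hlt, if_true]
      set mid := (lo + hi) / 2 with hmid
      have hmlo : lo ≤ mid := by omega
      have hmhi : mid < hi := by omega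
      by_cases hc : pos < (PySem.List.pyGet? p (mid : Int)).getD 0
      · simp only [hc, if_true]
        exact ihf lo mid (by omega) hmlo (by omega)
          hlow
          (fun i hmi hip => lt_of_lt_of_le hc (mono mid i hmi hip))
      · simp only [hc, if_false]
        exact ihf (mid + 1) hi (by omega) (by omega) hhp
          (fun i hi' => le_trans (mono i mid (by omega) (by omega)) (not_lt.mp hc))
          hhigh
    · simp only [hlt, if_false]
      have : lo = hi := by omega
      subst this
      exact ⟨hhp, hlow, fun h => hhigh lo le_rfl h⟩

-- the least index with cumLen (k+1) > position, as A's loop finds it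
def findIdx (position total : Int) : List (List Int) → Nat
  | [] => 0
  | c :: rest =>
    if total + (c.length : Int) > position then 0
    else findIdx position (total + (c.length : Int)) rest + 1

lemma findIdx_le (position total : Int) (genome : List (List Int)) :
    findIdx position total genome ≤ genome.length := by
  induction genome generalizing total with
  | nil => simp [findIdx]
  | cons c rest ih =>
    simp only [findIdx, List.length_cons]
    split_ifs
    · omega
    · have := ih (total + (c.length : Int)); omega

lemma findIdx_low (position total : Int) (genome : List (List Int)) :
    ∀ i : Nat, i < findIdx position total genome → total + cumLen genome (i + 1) ≤ position := by
  induction genome generalizing total with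
  | nil => simp [findIdx]
  | cons c rest ih =>
    intro i hi
    simp only [findIdx] at hi
    split_ifs at hi with hcond
    · omega
    · cases i with
      | zero =>
        simp only [cumLen, List.take_succ_cons, List.take_zero, List.map_cons, List.map_nil,
          List.sum_cons, List.sum_nil, add_zero]
        omega
      | succ n =>
        have := ih (total + (c.length : Int)) n (by omega)
        simp only [cumLen, List.take_succ_cons, List.map_cons, List.sum_cons] at this ⊢
        omega

lemma findIdx_hit (position total : Int) (genome : List (List Int)) :
    findIdx position total genome < genome.length →
    position < total + cumLen genome (findIdx position total genome + 1) := by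
  induction genome generalizing total with
  | nil => simp [findIdx]
  | cons c rest ih =>
    intro hlt
    simp only [findIdx] at hlt ⊢
    split_ifs at hlt ⊢ with hcond
    · simpa [cumLen] using hcond
    · have hlt' : findIdx position (total + (c.length : Int)) rest < rest.length := by
        simp only [List.length_cons] at hlt; omega
      have := ih (total + (c.length : Int)) hlt'
      simp only [cumLen, List.take_succ_cons, List.map_cons, List.sum_cons] at this ⊢
      omega

-- A's loop returns genome with chromosome (findIdx) modified (when it exists)
lemma applyDelLoop_eq (position : Int) (genome : List (List Int)) : ∀ total : Int,
    applyDelLoop position total genome =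
      (if h : findIdx position total genome < genome.length then
        genome.set (findIdx position total genome)
          (let c := genome[findIdx position total genome]
           if 1 < c.length then
             pyDel c (position - (total + cumLen genome (findIdx position total genome)))
           else c)
      else genome) := by
  induction genome with
  | nil => intro total; simp [applyDelLoop]
  | cons c rest ih =>
    intro total
    by_cases hcond : total + (c.length : Int) > position
    · have h0 : findIdx position total (c :: rest) = 0 := by simp [findIdx, hcond]
      simp only [applyDelLoop, if_pos hcond, h0]
      rw [dif_pos (by simp)]
      simp only [List.getElem_cons_zero, List.set_cons_zero, cumLen, List.take_zero,
        List.map_nil, List.sum_nil, add_zero]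
    · have h1 : findIdx position total (c :: rest)
          = findIdx position (total + (c.length : Int)) rest + 1 := by
        simp [findIdx, hcond]
      simp only [applyDelLoop, if_neg hcond, h1]
      rw [ih (total + (c.length : Int))]
      by_cases h : findIdx position (total + (c.length : Int)) rest < rest.length
      · rw [dif_pos h, dif_pos (by simp only [List.length_cons]; omega)]
        have hc2 : cumLen (c :: rest)
              (findIdx position (total + (c.length : Int)) rest + 1)
            = (c.length : Int) + cumLen rest (findIdx position (total + (c.length : Int)) rest) := by
          simp [cumLen, List.take_succ_cons]
        have harg : position - (total + (c.length : Int) +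
              cumLen rest (findIdx position (total + (c.length : Int)) rest))
            = position - (total + ((c.length : Int) +
              cumLen rest (findIdx position (total + (c.length : Int)) rest))) := by ring
        simp only [List.set_cons_succ, List.getElem_cons_succ, hc2, harg]
      · rw [dif_neg h, dif_neg (by simp only [List.length_cons]; omega)]

lemma set_getElem_self (l : List (List Int)) (k : Nat) (h : k < l.length) :
    l.set k l[k] = l := by
  apply List.ext_getElem
  · simp
  · intro i h1 h2
    by_cases hik : i = k
    · subst hik; simp
    · simp [List.getElem_set, hik]

-- ===== VERDICT (by name: the statement is the Claim_ definition above) =====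
theorem apply_deletion_spec : Claim_equal_apply_deletion := by
  intro genome position _ _
  simp only [Spec_apply_deletion, apply_deletion, apply_deletion_alt]
  rw [foldl_pref]
  simp only [List.nil_append]
  set p := cumList 0 genome with hp
  have hplen : p.length = genome.length := cumList_length 0 genome
  have hget : ∀ i : Nat, i < genome.length →
      (PySem.List.pyGet? p (i : Int)).getD 0 = cumLen genome (i + 1) := by
    intro i hi
    rw [hp, cumList_get genome 0 i hi]; ring
  have mono : ∀ i j : Nat, i ≤ j → j < p.length →
      (PySem.List.pyGet? p (i : Int)).getD 0 ≤ (PySem.List.pyGet? p (j : Int)).getD 0 := by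
    intro i j hij hj
    rw [hplen] at hj
    rw [hget i (by omega), hget j hj]
    exact cumLen_mono genome (by omega)
  -- characterize the binary search result
  have hbs := bsearch_spec p position mono (genome.length - 0) 0 genome.length
    (by omega) (by omega) (by omega)
    (by intro i hi; omega)
    (by intro i h1 h2; rw [hplen] at h2; omega)
  set lo := bsearchLoop p position 0 genome.length with hlo
  obtain ⟨hr1, hr2, hr3⟩ := hbs
  rw [hplen] at hr1 hr3
  -- characterize A's index
  set k := findIdx position 0 genome with hk
  have hkle := findIdx_le position 0 genome
  have hklow := findIdx_low position 0 genome
  have hkhit := findIdx_hit position 0 genome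
  rw [← hk] at hkle hklow hkhit
  -- lo = k
  have hkeq : lo = k := by
    by_contra hne
    rcases Nat.lt_or_ge lo k with h | h
    · -- lo < k ≤ len, so lo < len: pref[lo] > position but cumLen(lo+1) ≤ position
      have hlt : lo < genome.length := by omega
      have h1 := hr3 hlt
      rw [hget lo hlt] at h1
      have h2 := hklow lo h
      omega
    · have hlt : k < genome.length := by omega
      have h1 := hkhit hlt
      have h2 := hr2 k (by omega)
      rw [hget k hlt] at h2
      omega
  rw [applyDelLoop_eq, ← hk, hkeq]
  by_cases hfin : k < genome.length
  · rw [dif_pos hfin, if_pos hfin]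
    have hc : (PySem.List.pyGet? genome (k : Int)).getD [] = genome[k] := by
      simp [PySem.List.pyGet?_natCast, List.getElem?_eq_getElem hfin]
    rw [hc, hget k hfin]
    by_cases hlen : 1 < genome[k].length
    · rw [if_pos hlen, if_pos hlen]
      congr 2
      rw [cumLen_succ genome k hfin]
      ring
    · rw [if_neg hlen, if_neg hlen, set_getElem_self]
  · rw [dif_neg hfin, if_neg hfin]
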